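-- pv_equiv track=rewrite | github.com/gastronleroux/Pyamu | pyamu.py | lexicalOrderRecursive
-- ===== SOURCE A (Python) =====
-- def ifVarNone(x, y):
--     if x is None: return y
--     else: return x
--
-- def lexicalOrderRecursive(n, k = None,):
--     def recur(n, k, output, x = [], i = 0):
--         if(x == []): x = [0]*(n+1)
--         if i == n:
--             output.append(x[1:])
--         else:
--             for j in range(1, k+1):
--                 x[i+1] = j
--                 recur(n, k, output, x, i+1)
--
--     output = []
--     k = ifVarNone(k, n)
--     recur(n, k, output)
--     return output
-- ===== SOURCE B (Python) =====
-- def lexicalOrderRecursive(n, k = None,):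
--     if k is None:
--         k = n
--     if n < 0:
--         return []
--     seqs = [[]]
--     for _ in range(n):
--         seqs = [s + [j] for s in seqs for j in range(1, k + 1)]
--     return seqs
-- ===== Notes on version B (the rewrite author's own statement) =====
-- stated objective: alternative
-- what changed: Replaces the depth-first recursion over a shared mutable digit buffer by an iterative breadth-first product construction that rebuilds the sequence list layer by layer (seqs = [s+[j] ...] repeated n times), guarding negative n directly.
-- crash fix: For n < 0 with effective k >= 1 A raises IndexError (x[1] on an empty buffer); B returns [] there. — e.g. on lexicalOrderRecursive(-1, some 1): A raises IndexError, B returns []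
import Mathlib
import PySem

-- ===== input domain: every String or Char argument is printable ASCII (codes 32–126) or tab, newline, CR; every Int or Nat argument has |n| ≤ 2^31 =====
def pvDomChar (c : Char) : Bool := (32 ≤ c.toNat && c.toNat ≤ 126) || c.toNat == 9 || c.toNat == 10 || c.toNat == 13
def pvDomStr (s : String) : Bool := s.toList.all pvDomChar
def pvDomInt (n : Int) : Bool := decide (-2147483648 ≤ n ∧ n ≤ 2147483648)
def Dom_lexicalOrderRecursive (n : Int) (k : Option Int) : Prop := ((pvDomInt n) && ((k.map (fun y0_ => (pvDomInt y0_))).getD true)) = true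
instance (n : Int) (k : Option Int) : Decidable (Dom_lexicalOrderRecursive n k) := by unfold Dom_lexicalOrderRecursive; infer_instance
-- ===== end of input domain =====

-- B (alternative): iterative breadth-first product construction instead of A's depth-first
-- recursion over a shared mutable digit buffer; same return value on Pre_, B returns [] where A raises.


-- ===== PORT A =====
def ifVarNone (x : Option Int) (y : Int) : Int :=
  match x with
  | none => y
  | some v => v

-- inner 'recur': output and x are threaded through as state (Python mutates both in place);
-- 'fuel' is only a totality guard (the recursion depth is n - i; the top call supplies enough fuel).
def recurA (fuel : Nat) (n k : Int) (output : List (List Int)) (x : List Int) (i : Int) :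
    List (List Int) × List Int :=
  let x := if x = [] then List.replicate (n + 1).toNat 0 else x   -- x = [0]*(n+1)
  if i = n then
    (output ++ [PySem.List.slice x (some 1) none], x)             -- output.append(x[1:])
  else
    match fuel with
    | 0 => (output, x)
    | fuel' + 1 =>
      (PySem.List.pyRange 1 (k + 1) 1).foldl                      -- for j in range(1, k+1)
        (fun st j => recurA fuel' n k st.1 (PySem.List.pySetD st.2 (i + 1) j) (i + 1))
        (output, x)

def lexicalOrderRecursive (n : Int) (k : Option Int) : List (List Int) :=
  let output : List (List Int) := []
  let k := ifVarNone k n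
  (recurA (n.toNat + 1) n k output [] 0).1

-- ===== PORT B =====
def lexicalOrderRecursive_alt (n : Int) (k : Option Int) : List (List Int) :=
  let k := k.getD n
  if n < 0 then []
  else
    (PySem.List.pyRange 0 n 1).foldl
      (fun seqs _ => seqs.flatMap (fun s => (PySem.List.pyRange 1 (k + 1) 1).map (fun j => s ++ [j])))
      [[]]

-- ===== PRECONDITION & SPEC =====
-- Pre_ excludes exactly the inputs where A raises IndexError: n < 0 with effective k ≥ 1
-- (recur assigns x[1] on the empty buffer [0]*(n+1) = []).
def Pre_lexicalOrderRecursive (n : Int) (k : Option Int) : Prop := 0 ≤ n ∨ k.getD n ≤ 0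
instance (n : Int) (k : Option Int) : Decidable (Pre_lexicalOrderRecursive n k) := by
  unfold Pre_lexicalOrderRecursive; infer_instance

def pvWitness_lexicalOrderRecursive : Int × Option Int := (2, some 2)

-- For n < 0 with effective k ≥ 1 A raises IndexError (x[1] on an empty buffer); B returns [] there.
def Raises_lexicalOrderRecursive (n : Int) (k : Option Int) : Prop := n < 0 ∧ 1 ≤ k.getD n
instance (n : Int) (k : Option Int) : Decidable (Raises_lexicalOrderRecursive n k) := by
  unfold Raises_lexicalOrderRecursive; infer_instance
def pvRaiseWitness_lexicalOrderRecursive : Int × Option Int := (-1, some 1)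
def pvRaiseWitnessOut_lexicalOrderRecursive : List (List Int) := []

def Spec_lexicalOrderRecursive (n : Int) (k : Option Int) (out : List (List Int)) : Prop := out = lexicalOrderRecursive_alt n k
instance (n : Int) (k : Option Int) (out : List (List Int)) : Decidable (Spec_lexicalOrderRecursive n k out) := by unfold Spec_lexicalOrderRecursive; infer_instance

-- ===== CLAIM (what is proved, stated in full; the proofs are below) =====
def Claim_equal_lexicalOrderRecursive : Prop := ∀ (n : Int) (k : Option Int), Dom_lexicalOrderRecursive n k → Pre_lexicalOrderRecursive n k → Spec_lexicalOrderRecursive n k (lexicalOrderRecursive n k)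

def Claim_raises_lexicalOrderRecursive : Prop := (∀ (n : Int) (k : Option Int), Dom_lexicalOrderRecursive n k → Raises_lexicalOrderRecursive n k → ¬ Pre_lexicalOrderRecursive n k) ∧ (Dom_lexicalOrderRecursive (pvRaiseWitness_lexicalOrderRecursive.1) (pvRaiseWitness_lexicalOrderRecursive.2) ∧ Raises_lexicalOrderRecursive (pvRaiseWitness_lexicalOrderRecursive.1) (pvRaiseWitness_lexicalOrderRecursive.2) ∧ lexicalOrderRecursive_alt (pvRaiseWitness_lexicalOrderRecursive.1) (pvRaiseWitness_lexicalOrderRecursive.2) = pvRaiseWitnessOut_lexicalOrderRecursive)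

-- ===== LEMMAS AND PROOFS =====

-- all length-m words over 1..k, first digit varying slowest (lexicographic order)
def pvW (k : Int) : Nat → List (List Int)
  | 0 => [[]]
  | m + 1 => (PySem.List.pyRange 1 (k + 1) 1).flatMap (fun j => (pvW k m).map (fun s => j :: s))

theorem pvComm (D : List Int) (Y : List (List Int)) :
    (D.flatMap (fun j => Y.map (fun s => j :: s))).flatMap (fun s => D.map (fun a => s ++ [a])) =
    D.flatMap (fun j => (Y.flatMap (fun s => D.map (fun a => s ++ [a]))).map (fun s => j :: s)) := by
  simp [List.flatMap_assoc, List.map_flatMap, List.flatMap_map, List.map_map, Function.comp_def]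

theorem pvW_snoc (k : Int) (m : Nat) :
    pvW k (m + 1) =
      (pvW k m).flatMap (fun s => (PySem.List.pyRange 1 (k + 1) 1).map (fun j => s ++ [j])) := by
  induction m with
  | zero => simp [pvW, Eq.symm List.map_eq_flatMap]
  | succ m ih =>
    show pvW k (m + 2) = _
    rw [show pvW k (m + 2) =
        (PySem.List.pyRange 1 (k + 1) 1).flatMap (fun j => (pvW k (m + 1)).map (fun s => j :: s))
      from rfl]
    conv_lhs => rw [ih]
    rw [show pvW k (m + 1) =
        (PySem.List.pyRange 1 (k + 1) 1).flatMap (fun j => (pvW k m).map (fun s => j :: s))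
      from rfl]
    exact (pvComm _ _).symm

theorem foldl_ignore_iterate (F : List (List Int) → List (List Int)) :
    ∀ (l : List Int) (init : List (List Int)),
      l.foldl (fun acc _ => F acc) init = F^[l.length] init := by
  intro l
  induction l with
  | nil => intro init; simp
  | cons a l ih =>
    intro init
    simp [List.foldl_cons, ih, Function.iterate_succ_apply]

theorem iterate_step_pvW (k : Int) (t : Nat) :
    (fun seqs => seqs.flatMap
        (fun s => (PySem.List.pyRange 1 (k + 1) 1).map (fun j => s ++ [j])))^[t] [[]] = pvW k t := by
  induction t with
  | zero => simp [pvW]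
  | succ t ih => rw [Function.iterate_succ_apply', ih, ← pvW_snoc]

theorem alt_eq_pvW (n : Int) (k : Option Int) (hn : 0 ≤ n) :
    lexicalOrderRecursive_alt n k = pvW (k.getD n) n.toNat := by
  unfold lexicalOrderRecursive_alt
  rw [if_neg (by omega)]
  rw [foldl_ignore_iterate, PySem.List.length_pyRange_one]
  simpa using iterate_step_pvW (k.getD n) (n - 0).toNat

-- ===== the A-side invariant =====

theorem recurA_spec (k : Int) : ∀ (fuel : Nat) (n i : Int) (x : List Int) (output : List (List Int)),
    0 ≤ i → i ≤ n → x.length = (n + 1).toNat → (n - i).toNat ≤ fuel →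
    (recurA fuel n k output x i).1 =
        output ++ (pvW k (n - i).toNat).map (fun w => x.tail.take i.toNat ++ w)
      ∧ (recurA fuel n k output x i).2.length = x.length
      ∧ (recurA fuel n k output x i).2.take (i + 1).toNat = x.take (i + 1).toNat := by
  intro fuel
  induction fuel with
  | zero =>
    intro n i x output h0 hin hlen hfuel
    have hni : i = n := by omega
    have hx : x ≠ [] := by
      intro h; rw [h] at hlen; simp at hlen; omega
    subst hni
    rw [recurA]
    simp only [if_neg hx]
    simp only [if_true]
    have hveq : (i - i).toNat = 0 := by omega
    constructor
    · rw [hveq, PySem.List.slice_from_one]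
      simp only [pvW, List.map_cons, List.map_nil, List.append_nil]
      have htl : x.tail.length = i.toNat := by
        rw [List.length_tail, hlen]; omega
      rw [List.take_of_length_le (le_of_eq htl)]
    · exact ⟨by trivial, by trivial⟩
  | succ fuel ih =>
    intro n i x output h0 hin hlen hfuel
    have hx : x ≠ [] := by
      intro h; rw [h] at hlen; simp at hlen; omega
    by_cases hni : i = n
    · subst hni
      rw [recurA]
      simp only [if_neg hx]
      simp only [if_true]
      have hveq : (i - i).toNat = 0 := by omega
      constructor
      · rw [hveq, PySem.List.slice_from_one]
        simp only [pvW, List.map_cons, List.map_nil, List.append_nil]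
        have htl : x.tail.length = i.toNat := by
          rw [List.length_tail, hlen]; omega
        rw [List.take_of_length_le (le_of_eq htl)]
      · exact ⟨by trivial, by trivial⟩
    · have hlt : i < n := lt_of_le_of_ne hin hni
      rw [recurA]
      simp only [if_neg hx, if_neg hni]
      -- the fold invariant, by induction over the range list
      have key : ∀ (js : List Int) (out0 : List (List Int)) (y : List Int),
          y.length = x.length → y.take (i + 1).toNat = x.take (i + 1).toNat →
          (js.foldl (fun st j => recurA fuel n k st.1 (PySem.List.pySetD st.2 (i + 1) j) (i + 1))
              (out0, y)).1 =
              out0 ++ js.flatMap (fun j =>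
                (pvW k (n - (i + 1)).toNat).map (fun w => x.tail.take i.toNat ++ (j :: w)))
            ∧ (js.foldl (fun st j => recurA fuel n k st.1 (PySem.List.pySetD st.2 (i + 1) j) (i + 1))
                (out0, y)).2.length = x.length
            ∧ (js.foldl (fun st j => recurA fuel n k st.1 (PySem.List.pySetD st.2 (i + 1) j) (i + 1))
                (out0, y)).2.take (i + 1).toNat = x.take (i + 1).toNat := by
        intro js
        induction js with
        | nil => intro out0 y hy1 hy2; simpa using ⟨hy1, hy2⟩
        | cons j js ihjs =>
          intro out0 y hy1 hy2
          simp only [List.foldl_cons]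
          set m : Nat := (i + 1).toNat with hm
          have hmlt : m < y.length := by rw [hy1, hlen]; omega
          have hset : PySem.List.pySetD y (i + 1) j = y.set m j :=
            PySem.List.pySetD_of_nonneg _ _ (by omega)
          have hylen' : (y.set m j).length = (n + 1).toNat := by
            rw [List.length_set, hy1, hlen]
          have hrec := ih n (i + 1) (y.set m j) out0 (by omega) (by omega) hylen' (by omega)
          obtain ⟨hr1, hr2, hr3⟩ := hrec
          -- prefix of the recursion's x-argument
          have hm1le : 1 ≤ m := by omega
          have htailset : (y.set m j).tail = y.tail.set (m - 1) j := by
            rw [← List.drop_one, ← List.drop_one, List.drop_set, if_neg (by omega)]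
          have hprefix : (y.set m j).tail.take (i + 1).toNat = x.tail.take i.toNat ++ [j] := by
            rw [htailset]
            have hm1 : m - 1 = i.toNat := by omega
            have hlt' : i.toNat < y.tail.length := by
              rw [List.length_tail, hy1, hlen]; omega
            rw [hm1]
            have hset_eq : y.tail.set i.toNat j =
                y.tail.take i.toNat ++ j :: y.tail.drop (i.toNat + 1) := by
              rw [List.set_eq_take_append_cons_drop, if_pos hlt']
            rw [hset_eq]
            have hmi : (i + 1).toNat = i.toNat + 1 := by omega
            rw [hmi, List.take_append]
            have hlen_take : (y.tail.take i.toNat).length = i.toNat := by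
              simp; omega
            rw [hlen_take]
            simp
            -- remains: y.tail.take i.toNat = x.tail.take i.toNat
            have : y.tail.take i.toNat = x.tail.take i.toNat := by
              have h1 : y.tail.take i.toNat = (y.take m).tail := by
                rw [← List.drop_one (l := y), ← List.drop_one (l := y.take m), List.drop_take]
                congr 1; omega
              have h2 : x.tail.take i.toNat = (x.take m).tail := by
                rw [← List.drop_one (l := x), ← List.drop_one (l := x.take m), List.drop_take]
                congr 1; omega
              rw [h1, h2, hy2]
            rw [this, List.take_take, Nat.min_eq_right (by omega)]
          -- prefix preservation of the recursion's x-result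
          have hpres : (recurA fuel n k out0 (y.set m j) (i + 1)).2.take (i + 1).toNat =
              x.take (i + 1).toNat := by
            have hmono : (i + 1).toNat ≤ (i + 1 + 1).toNat := by omega
            have h1 : (recurA fuel n k out0 (y.set m j) (i + 1)).2.take (i + 1).toNat =
                ((recurA fuel n k out0 (y.set m j) (i + 1)).2.take (i + 1 + 1).toNat).take
                  (i + 1).toNat := by
              rw [List.take_take, Nat.min_eq_left hmono]
            rw [h1, hr3, List.take_take, Nat.min_eq_left hmono]
            have : (y.set m j).take (i + 1).toNat = y.take (i + 1).toNat := by
              apply List.take_set_of_le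
              omega
            rw [this, hy2]
          have hreclen : (recurA fuel n k out0 (y.set m j) (i + 1)).2.length = x.length := by
            rw [hr2, hylen', hlen]
          obtain ⟨hj1, hj2, hj3⟩ :=
            ihjs (recurA fuel n k out0 (y.set m j) (i + 1)).1
              (recurA fuel n k out0 (y.set m j) (i + 1)).2 hreclen hpres
          rw [hset]
          refine ⟨?_, hj2, hj3⟩
          rw [hj1, hr1, hprefix]
          simp [List.flatMap_cons, List.append_assoc]
      obtain ⟨hk1, hk2, hk3⟩ :=
        key (PySem.List.pyRange 1 (k + 1) 1) output x rfl rfl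
      refine ⟨?_, hk2, hk3⟩
      rw [hk1]
      congr 1
      have hstep : (n - i).toNat = (n - (i + 1)).toNat + 1 := by omega
      rw [hstep, show pvW k ((n - (i + 1)).toNat + 1) =
          (PySem.List.pyRange 1 (k + 1) 1).flatMap
            (fun j => (pvW k (n - (i + 1)).toNat).map (fun s => j :: s)) from rfl]
      simp [List.map_flatMap, List.map_map, Function.comp_def]

-- the initial empty buffer is replaced by [0]*(n+1) on entry
theorem recurA_nil (fuel : Nat) (n k : Int) (output : List (List Int)) (i : Int) :
    recurA fuel n k output [] i = recurA fuel n k output (List.replicate (n + 1).toNat 0) i := by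
  cases fuel <;>
    (rw [recurA, recurA]
     by_cases h : (List.replicate (n + 1).toNat (0 : Int)) = [] <;> simp [h])

theorem A_eq_pvW (n : Int) (k : Option Int) (hn : 0 ≤ n) :
    lexicalOrderRecursive n k = pvW (k.getD n) n.toNat := by
  simp only [lexicalOrderRecursive]
  have hkd : ifVarNone k n = k.getD n := by cases k <;> rfl
  rw [hkd, recurA_nil]
  have hxlen : (List.replicate (n + 1).toNat (0 : Int)).length = (n + 1).toNat := by simp
  obtain ⟨h1, -, -⟩ :=
    recurA_spec (k.getD n) (n.toNat + 1) n 0 (List.replicate (n + 1).toNat 0) []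
      le_rfl hn hxlen (by omega)
  rw [h1]
  simp

-- ===== VERDICT (by name: the statement is the Claim_ definition above) =====
theorem lexicalOrderRecursive_spec : Claim_equal_lexicalOrderRecursive := by
  intro n k _ hpre
  unfold Spec_lexicalOrderRecursive
  by_cases hn : 0 ≤ n
  · rw [A_eq_pvW n k hn, alt_eq_pvW n k hn]
  · -- n < 0 and (Pre_) effective k ≤ 0: both sides are []
    have hk : k.getD n ≤ 0 := by
      rcases hpre with h | h
      · omega
      · exact h
    simp only [lexicalOrderRecursive, lexicalOrderRecursive_alt]
    have hkd : ifVarNone k n = k.getD n := by cases k <;> rfl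
    rw [hkd, if_pos (by omega : n < 0)]
    rw [recurA.eq_def]
    have hrep : List.replicate (n + 1).toNat (0 : Int) = [] := by
      have : (n + 1).toNat = 0 := by omega
      rw [this]; rfl
    simp only [hrep]
    rw [if_neg (by omega : ¬ (0 : Int) = n)]
    rw [PySem.List.pyRange_one_eq_nil (by omega : k.getD n + 1 ≤ 1)]
    rfl

theorem lexicalOrderRecursive_raises : Claim_raises_lexicalOrderRecursive := by
  unfold Claim_raises_lexicalOrderRecursive
  constructor
  · intro n k _ hr hpre
    rcases hr with ⟨h1, h2⟩
    rcases hpre with h | h <;> omega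
  · exact ⟨by decide, by decide, by decide⟩

-- self-check: the raise witness really lies outside Pre_ (via the first half of the raises claim)
theorem pvRaiseWitness_outside_Pre_ok :
    ¬ Pre_lexicalOrderRecursive pvRaiseWitness_lexicalOrderRecursive.1 pvRaiseWitness_lexicalOrderRecursive.2 :=
  lexicalOrderRecursive_raises.1 _ _ (by decide) (by decide)
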